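-- pv_equiv track=rewrite | github.com/TKahyo/PRS-ensemble-pipeline | run_structure_png.py | make_segments
-- ===== SOURCE A (Python) =====
-- def make_segments(ss_map):
--     """
--     Convert residue-level annotation into contiguous segments.
--     """
--     segments = []
--
--     residues = sorted(ss_map.keys())
--
--     start = residues[0]
--     prev = start
--     prev_ss = ss_map[start]
--
--     for r in residues[1:]:
--
--         if ss_map[r] == prev_ss and r == prev + 1:
--             prev = r
--         else:
--             segments.append((start, prev, prev_ss))
--             start = r
--             prev = r
--             prev_ss = ss_map[r]
--
--     segments.append((start, prev, prev_ss))
--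
--     return segments
-- ===== SOURCE B (Python) =====
-- def make_segments(ss_map):
--     """
--     Convert residue-level annotation into contiguous segments.
--
--     A residue starts a segment iff its left neighbour is absent or annotated
--     differently; it ends one symmetrically; paired in sorted order.
--     """
--     residues = sorted(ss_map)
--     starts = [r for r in residues if r - 1 not in ss_map or ss_map[r - 1] != ss_map[r]]
--     ends = [r for r in residues if r + 1 not in ss_map or ss_map[r + 1] != ss_map[r]]
--     return [(s, e, ss_map[s]) for s, e in zip(starts, ends)]
-- ===== Notes on version B (the rewrite author's own statement) =====
-- stated objective: alternative
-- what changed: Replaces A's sequential prev/prev_ss state machine with two neighbour-lookup filters over the sorted residues (a residue starts a segment iff its left neighbour is absent or differently annotated, ends one symmetrically) zipped into segments.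
-- crash fix: On an empty ss_map A raises IndexError (residues[0]); B returns []. — e.g. on make_segments([]): A raises IndexError, B returns []
import Mathlib
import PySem

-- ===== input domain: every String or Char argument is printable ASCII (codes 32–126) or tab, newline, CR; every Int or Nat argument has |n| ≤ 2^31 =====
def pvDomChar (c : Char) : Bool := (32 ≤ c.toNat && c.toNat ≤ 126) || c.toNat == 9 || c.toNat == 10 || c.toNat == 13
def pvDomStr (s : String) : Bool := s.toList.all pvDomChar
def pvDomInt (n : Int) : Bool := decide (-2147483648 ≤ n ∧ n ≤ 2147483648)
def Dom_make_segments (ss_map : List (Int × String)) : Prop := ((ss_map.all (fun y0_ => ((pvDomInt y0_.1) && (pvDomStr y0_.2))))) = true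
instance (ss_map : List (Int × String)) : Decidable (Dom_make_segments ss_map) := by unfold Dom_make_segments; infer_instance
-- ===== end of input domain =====

-- B replaces A's sequential prev/prev_ss state machine by two neighbour-lookup filters
-- (segment starts / segment ends) zipped together; same cost, different decomposition.

-- ===== PORT A =====
-- Port of A: sorted residues, then a fold carrying (segments, start, prev, prev_ss).
def make_segments (ss_map : List (Int × String)) : List (Int × Int × String) :=
  let d := PySem.Dict.ofList ss_map
  let residues := PySem.List.sorted d.keys (fun x => x) false
  match residues with
  | [] => []   -- Python raises IndexError on residues[0]; excluded by Pre_make_segments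
  | r0 :: rest =>
    let fin := rest.foldl (fun acc r =>
        if d.getD r "" == acc.2.2.2 && r == acc.2.2.1 + 1 then
          (acc.1, acc.2.1, r, acc.2.2.2)
        else
          (acc.1 ++ [(acc.2.1, acc.2.2.1, acc.2.2.2)], r, r, d.getD r ""))
      (([] : List (Int × Int × String)), r0, r0, d.getD r0 "")
    fin.1 ++ [(fin.2.1, fin.2.2.1, fin.2.2.2)]

-- ===== PORT B =====
def make_segments_alt (ss_map : List (Int × String)) : List (Int × Int × String) :=
  let d := PySem.Dict.ofList ss_map
  let residues := PySem.List.sorted d.keys (fun x => x) false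
  let starts := residues.filter (fun r => !d.contains (r - 1) || d.getD (r - 1) "" != d.getD r "")
  let ends := residues.filter (fun r => !d.contains (r + 1) || d.getD (r + 1) "" != d.getD r "")
  (starts.zip ends).map (fun p => (p.1, p.2, d.getD p.1 ""))

-- ===== PRECONDITION & SPEC =====
-- Pre_ excludes only the empty map, on which A raises IndexError (residues[0]).
def Pre_make_segments (ss_map : List (Int × String)) : Prop := ss_map ≠ []
instance (ss_map : List (Int × String)) : Decidable (Pre_make_segments ss_map) := by unfold Pre_make_segments; infer_instance
def pvWitness_make_segments : (List (Int × String)) := [(1, "H"), (2, "H"), (4, "E")]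

-- On an empty ss_map A raises IndexError (residues[0]); B returns [].
def Raises_make_segments (ss_map : List (Int × String)) : Prop := ss_map = []
instance (ss_map : List (Int × String)) : Decidable (Raises_make_segments ss_map) := by unfold Raises_make_segments; infer_instance
def pvRaiseWitness_make_segments : (List (Int × String)) := []
def pvRaiseWitnessOut_make_segments : List (Int × Int × String) := []

def Spec_make_segments (ss_map : List (Int × String)) (out : List (Int × Int × String)) : Prop := out = make_segments_alt ss_map
instance (ss_map : List (Int × String)) (out : List (Int × Int × String)) : Decidable (Spec_make_segments ss_map out) := by unfold Spec_make_segments; infer_instance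

-- ===== CLAIM (what is proved, stated in full; the proofs are below) =====
def Claim_equal_make_segments : Prop := ∀ (ss_map : List (Int × String)), Dom_make_segments ss_map → Pre_make_segments ss_map → Spec_make_segments ss_map (make_segments ss_map)
def Claim_raises_make_segments : Prop := (∀ (ss_map : List (Int × String)), Dom_make_segments ss_map → Raises_make_segments ss_map → ¬ Pre_make_segments ss_map) ∧ (Dom_make_segments (pvRaiseWitness_make_segments) ∧ Raises_make_segments (pvRaiseWitness_make_segments) ∧ make_segments_alt (pvRaiseWitness_make_segments) = pvRaiseWitnessOut_make_segments)

-- ===== LEMMAS AND PROOFS =====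

-- A's run-continuation test between the previous residue p and the next residue r.
def bC (m : Int → String) (p r : Int) : Bool := m r == m p && r == p + 1
-- B's segment-start test (left neighbour absent or differently annotated).
def bS (cont : Int → Bool) (m : Int → String) (r : Int) : Bool := !cont (r - 1) || m (r - 1) != m r
-- B's segment-end test (right neighbour absent or differently annotated).
def bE (cont : Int → Bool) (m : Int → String) (p : Int) : Bool := !cont (p + 1) || m (p + 1) != m p

-- The loop invariant: A's fold from state (segs, start, prev, m start) produces
-- segs ++ B's zip of pending start with the end-filtered remainder.
lemma loop_eq (m : Int → String) (cont : Int → Bool) :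
    ∀ (L : List Int) (segs : List (Int × Int × String)) (start prev : Int),
    m prev = m start →
    List.IsChain (fun p r => bS cont m r = !bC m p r ∧ bE cont m p = !bC m p r) (prev :: L) →
    (∀ x, (prev :: L).getLast? = some x → bE cont m x = true) →
    (let fin := L.foldl (fun acc r =>
        if m r == acc.2.2.2 && r == acc.2.2.1 + 1 then
          (acc.1, acc.2.1, r, acc.2.2.2)
        else
          (acc.1 ++ [(acc.2.1, acc.2.2.1, acc.2.2.2)], r, r, m r))
      (segs, start, prev, m start)
     fin.1 ++ [(fin.2.1, fin.2.2.1, fin.2.2.2)])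
    = segs ++ ((start :: L.filter (bS cont m)).zip ((prev :: L).filter (bE cont m))).map
        (fun p => (p.1, p.2, m p.1)) := by
  intro L
  induction L with
  | nil =>
    intro segs start prev hss _hch hlast
    have h := hlast prev (by simp)
    simp [h]
  | cons r t ih =>
    intro segs start prev hss hch hlast
    obtain ⟨hS, hE⟩ := List.rel_of_isChain_cons_cons hch
    have htail : List.IsChain (fun p r => bS cont m r = !bC m p r ∧ bE cont m p = !bC m p r) (r :: t) := hch.tail
    have hlast' : ∀ x, (r :: t).getLast? = some x → bE cont m x = true := by
      intro x hx
      exact hlast x (by rw [List.getLast?_cons_cons]; exact hx)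
    by_cases hc : bC m prev r = true
    · have hcond : (m r == m start && r == prev + 1) = true := by rw [← hss]; exact hc
      have hmr : m r = m start := by
        have h1 : (m r == m prev) = true := by
          have := hc
          simp only [bC, Bool.and_eq_true] at this
          exact this.1
        rw [beq_iff_eq.mp h1, hss]
      have hS0 : bS cont m r = false := by rw [hS, hc]; rfl
      have hE0 : bE cont m prev = false := by rw [hE, hc]; rfl
      simp only [List.foldl_cons, hcond, if_true]
      rw [ih segs start r hmr htail hlast']
      simp [List.filter_cons, hS0, hE0]
    · have hcf : bC m prev r = false := by
        cases h : bC m prev r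
        · rfl
        · exact absurd h hc
      have hcond : (m r == m start && r == prev + 1) = false := by rw [← hss]; exact hcf
      have hS1 : bS cont m r = true := by rw [hS, hcf]; rfl
      have hE1 : bE cont m prev = true := by rw [hE, hcf]; rfl
      simp only [List.foldl_cons, hcond, Bool.false_eq_true, reduceIte]
      rw [ih (segs ++ [(start, prev, m start)]) r r rfl htail hlast']
      simp [List.filter_cons, hS1, hE1, List.append_assoc]

-- On a strictly increasing list whose membership is decided by `cont`, B's start/end
-- tests between adjacent residues are exactly the negation of A's continuation test.
lemma chain_sorted (m : Int → String) (cont : Int → Bool) (L : List Int)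
    (hp : L.Pairwise (· < ·)) (hm : ∀ x, cont x = true ↔ x ∈ L) :
    List.IsChain (fun p r => bS cont m r = !bC m p r ∧ bE cont m p = !bC m p r) L := by
  rw [List.isChain_iff_getElem]
  intro i hi
  have hmono := List.pairwise_iff_getElem.mp hp
  have hab : L[i] < L[i + 1] := hmono i (i + 1) (by omega) hi (by omega)
  by_cases hb : L[i + 1] = L[i] + 1
  · have hb1 : L[i + 1] - 1 = L[i] := by omega
    have hca' : cont L[i] = true := (hm _).mpr (List.mem_iff_getElem.mpr ⟨i, by omega, rfl⟩)
    have hcbb : cont L[i + 1] = true := (hm _).mpr (List.mem_iff_getElem.mpr ⟨i + 1, hi, rfl⟩)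
    have hbb : (L[i + 1] == L[i] + 1) = true := beq_iff_eq.mpr hb
    constructor
    · simp only [bS, bC, hb1, hca', hbb, Bool.and_true]
      by_cases h : m L[i] = m L[i + 1]
      · simp [h]
      · simp [h, beq_eq_false_iff_ne.mpr (Ne.symm h)]
    · simp only [bE, bC, hbb, Bool.and_true]
      rw [show L[i] + 1 = L[i + 1] from hb.symm]
      simp [hcbb, bne]
  · have h1 : cont (L[i + 1] - 1) = false := by
      cases hcc : cont (L[i + 1] - 1)
      · rfl
      · exfalso
        obtain ⟨j, hj, hje⟩ := List.mem_iff_getElem.mp ((hm _).mp hcc)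
        have hcase : j < i ∨ j = i ∨ j = i + 1 ∨ i + 1 < j := by omega
        rcases hcase with h' | h' | h' | h'
        · have := hmono j i hj (by omega) h'
          omega
        · subst h'; omega
        · subst h'; omega
        · have := hmono (i + 1) j hi hj h'
          omega
    have h2 : cont (L[i] + 1) = false := by
      cases hcc : cont (L[i] + 1)
      · rfl
      · exfalso
        obtain ⟨j, hj, hje⟩ := List.mem_iff_getElem.mp ((hm _).mp hcc)
        have hcase : j < i ∨ j = i ∨ j = i + 1 ∨ i + 1 < j := by omega
        rcases hcase with h' | h' | h' | h'
        · have := hmono j i hj (by omega) h'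
          omega
        · subst h'; omega
        · subst h'; omega
        · have := hmono (i + 1) j hi hj h'
          omega
    have hbb : (L[i + 1] == L[i] + 1) = false := beq_eq_false_iff_ne.mpr hb
    constructor
    · simp [bS, bC, h1, hbb]
    · simp [bE, bC, h2, hbb]

lemma head_start (m : Int → String) (cont : Int → Bool) (h : Int) (t : List Int)
    (hp : (h :: t).Pairwise (· < ·)) (hm : ∀ x, cont x = true ↔ x ∈ h :: t) :
    bS cont m h = true := by
  have hf : cont (h - 1) = false := by
    cases hcc : cont (h - 1)
    · rfl
    · exfalso
      have hmem := (hm _).mp hcc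
      rcases List.mem_cons.mp hmem with h' | h'
      · omega
      · have := (List.pairwise_cons.mp hp).1 _ h'
        omega
  simp [bS, hf]

lemma last_end (m : Int → String) (cont : Int → Bool) (L : List Int)
    (hp : L.Pairwise (· < ·)) (hm : ∀ x, cont x = true ↔ x ∈ L) :
    ∀ x, L.getLast? = some x → bE cont m x = true := by
  intro x hx
  have hmono := List.pairwise_iff_getElem.mp hp
  have hne : L ≠ [] := by rintro rfl; simp at hx
  have hxe : x = L[L.length - 1]'(by cases L with | nil => exact absurd rfl hne | cons a t => simp) := by
    rw [List.getLast?_eq_getElem?] at hx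
    have := List.getElem?_eq_getElem (l := L) (i := L.length - 1)
      (by cases L with | nil => exact absurd rfl hne | cons a t => simp)
    rw [this] at hx
    exact (Option.some.injEq _ _ ▸ hx).symm
  have hf : cont (x + 1) = false := by
    cases hcc : cont (x + 1)
    · rfl
    · exfalso
      obtain ⟨j, hj, hje⟩ := List.mem_iff_getElem.mp ((hm _).mp hcc)
      have hcase : j < L.length - 1 ∨ j = L.length - 1 := by omega
      rcases hcase with h' | h'
      · have := hmono j (L.length - 1) hj (by omega) h'
        rw [← hxe] at this
        omega
      · subst h'
        rw [← hxe] at hje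
        omega
  simp [bE, hf]

-- ===== VERDICT (by name: the statement is the Claim_ definition above) =====
theorem make_segments_spec : Claim_equal_make_segments := by
  intro ss_map _hdom hpre
  unfold Spec_make_segments make_segments make_segments_alt
  obtain ⟨p, ps, rfl⟩ : ∃ p ps, ss_map = p :: ps := by
    cases ss_map with
    | nil => exact absurd rfl hpre
    | cons p ps => exact ⟨p, ps, rfl⟩
  have hnd : (PySem.Dict.ofList (p :: ps)).keys.Nodup := PySem.Dict.nodup_keys_ofList _
  have hperm := PySem.List.sorted_perm (PySem.Dict.ofList (p :: ps)).keys (fun x => x) false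
  have hRnd : (PySem.List.sorted (PySem.Dict.ofList (p :: ps)).keys (fun x => x) false).Nodup :=
    hperm.nodup_iff.mpr hnd
  have hle : (PySem.List.sorted (PySem.Dict.ofList (p :: ps)).keys (fun x => x) false).Pairwise
      (fun a b => a ≤ b) := PySem.List.sorted_pairwise (PySem.Dict.ofList (p :: ps)).keys (fun x => x)
  have hlt : (PySem.List.sorted (PySem.Dict.ofList (p :: ps)).keys (fun x => x) false).Pairwise (· < ·) :=
    (hle.and hRnd).imp (fun h => lt_of_le_of_ne h.1 h.2)
  have hm : ∀ x, (PySem.Dict.ofList (p :: ps)).contains x = true ↔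
      x ∈ PySem.List.sorted (PySem.Dict.ofList (p :: ps)).keys (fun x => x) false := fun x =>
    (PySem.Dict.contains_iff_mem_keys _ x).trans
      (PySem.List.mem_sorted (PySem.Dict.ofList (p :: ps)).keys (fun x => x) false x).symm
  have hkeys : (PySem.Dict.ofList (p :: ps)).keys =
      PySem.Set.update (PySem.Dict.empty : PySem.Dict Int String).keys ((p :: ps).map Prod.fst) :=
    PySem.Dict.keys_foldl_insert_key (p :: ps) Prod.fst (fun _ q => q.2) _
  have hpk : p.1 ∈ (PySem.Dict.ofList (p :: ps)).keys := by
    rw [hkeys]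
    exact (PySem.Set.mem_update _ _ _).mpr (Or.inr (by simp))
  have hRne : PySem.List.sorted (PySem.Dict.ofList (p :: ps)).keys (fun x => x) false ≠ [] := by
    intro h0
    have := (PySem.List.mem_sorted (PySem.Dict.ofList (p :: ps)).keys (fun x => x) false p.1).mpr hpk
    rw [h0] at this
    simp at this
  cases hE : PySem.List.sorted (PySem.Dict.ofList (p :: ps)).keys (fun x => x) false with
  | nil => exact absurd hE hRne
  | cons r0 rest =>
    rw [hE] at hlt hm
    have hchain := chain_sorted (fun r => (PySem.Dict.ofList (p :: ps)).getD r "")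
      (fun x => (PySem.Dict.ofList (p :: ps)).contains x) (r0 :: rest) hlt hm
    have hlast := last_end (fun r => (PySem.Dict.ofList (p :: ps)).getD r "")
      (fun x => (PySem.Dict.ofList (p :: ps)).contains x) (r0 :: rest) hlt hm
    have hhead := head_start (fun r => (PySem.Dict.ofList (p :: ps)).getD r "")
      (fun x => (PySem.Dict.ofList (p :: ps)).contains x) r0 rest hlt hm
    have key := loop_eq (fun r => (PySem.Dict.ofList (p :: ps)).getD r "")
      (fun x => (PySem.Dict.ofList (p :: ps)).contains x) rest [] r0 r0 rfl hchain hlast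
    simp only [hE]
    rw [key]
    simp only [List.nil_append]
    have hbsl : bS (fun x => (PySem.Dict.ofList (p :: ps)).contains x)
        (fun r => (PySem.Dict.ofList (p :: ps)).getD r "") =
        (fun r => !(PySem.Dict.ofList (p :: ps)).contains (r - 1) ||
          ((PySem.Dict.ofList (p :: ps)).getD (r - 1) "" != (PySem.Dict.ofList (p :: ps)).getD r "")) := rfl
    have hbel : bE (fun x => (PySem.Dict.ofList (p :: ps)).contains x)
        (fun r => (PySem.Dict.ofList (p :: ps)).getD r "") =
        (fun r => !(PySem.Dict.ofList (p :: ps)).contains (r + 1) ||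
          ((PySem.Dict.ofList (p :: ps)).getD (r + 1) "" != (PySem.Dict.ofList (p :: ps)).getD r "")) := rfl
    rw [hbsl, hbel]
    have hhead' : (!(PySem.Dict.ofList (p :: ps)).contains (r0 - 1) ||
        ((PySem.Dict.ofList (p :: ps)).getD (r0 - 1) "" != (PySem.Dict.ofList (p :: ps)).getD r0 "")) = true := hhead
    have hfS : List.filter (fun r => !(PySem.Dict.ofList (p :: ps)).contains (r - 1) ||
        ((PySem.Dict.ofList (p :: ps)).getD (r - 1) "" != (PySem.Dict.ofList (p :: ps)).getD r "")) (r0 :: rest) =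
        r0 :: List.filter (fun r => !(PySem.Dict.ofList (p :: ps)).contains (r - 1) ||
        ((PySem.Dict.ofList (p :: ps)).getD (r - 1) "" != (PySem.Dict.ofList (p :: ps)).getD r "")) rest := by
      rw [List.filter_cons, hhead']
      simp
    rw [hfS]

theorem make_segments_raises : Claim_raises_make_segments := by
  unfold Claim_raises_make_segments
  exact ⟨fun ss_map _ h hp => hp h, by decide⟩

-- self-check: the raise witness indeed falls outside Pre_make_segments
theorem pvRaiseWitness_ok : ¬ Pre_make_segments pvRaiseWitness_make_segments :=
  make_segments_raises.1 pvRaiseWitness_make_segments (by decide) (by decide)
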